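-- pv_equiv track=rewrite | github.com/AdamZhouSE/pythonHomework | Code/CodeRecords/2914/60705/257667.py | f
-- ===== SOURCE A (Python) =====
-- def f(array):
--     if len(array) == 1:
--         return "NO"
--     i = 0
--     while i < len(array):
--         if array[i] == 0:
--             del array[i]
--             i -= 1
--         else:
--             break
--         i += 1
--     i = len(array)-1
--     while i >= 0:
--         if array[i] == 0:
--             del array[i]
--         else:
--             break
--         i -= 1
--     if len(array) <= 1:
--         return "YES"
--     c = array[0]
--     for i in range(1, len(array)):
--         if array[i] != c:
--             return "NO"
--     return "YES"
-- ===== SOURCE B (Python) =====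
-- # B: strip zeros by locating the nonzero index span in one comprehension, then
-- # test distinctness with a set; equivalence is about the RETURN value only (A
-- # mutates its argument in place, B does not).
-- def f(array):
--     if len(array) == 1:
--         return "NO"
--     nz = [i for i, x in enumerate(array) if x != 0]
--     if not nz:
--         return "YES"
--     return "YES" if len(set(array[nz[0]:nz[-1] + 1])) <= 1 else "NO"
-- ===== Notes on version B (the rewrite author's own statement) =====
-- stated objective: idiomatic
-- what changed: B replaces A's in-place del loops and early-exit compare-to-first scan by locating the first/last nonzero indices with one enumerate comprehension, slicing that span, and testing len(set(slice)) <= 1; B also does not mutate its argument.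
import Mathlib
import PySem

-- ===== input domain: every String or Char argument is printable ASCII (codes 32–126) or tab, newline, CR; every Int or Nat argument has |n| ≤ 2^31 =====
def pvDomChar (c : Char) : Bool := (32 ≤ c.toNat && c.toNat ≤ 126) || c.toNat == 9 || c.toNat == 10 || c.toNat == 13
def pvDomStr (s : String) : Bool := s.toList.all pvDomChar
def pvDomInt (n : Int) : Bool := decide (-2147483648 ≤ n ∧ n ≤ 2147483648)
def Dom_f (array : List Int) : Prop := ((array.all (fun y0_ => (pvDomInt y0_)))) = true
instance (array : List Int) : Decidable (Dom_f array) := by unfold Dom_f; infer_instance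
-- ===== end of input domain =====

-- B locates the nonzero span with one enumerate pass, slices it and tests distinctness with a set,
-- instead of A's in-place del loops plus early-exit compare-to-first scan (idiomatic; equivalence is
-- about the RETURN value only: A mutates its argument in place, B does not).

-- ===== PORT A =====
-- A's first while loop always re-inspects index 0 (i is reset to 0 after each del) and dels while it is 0
def fStripLead : List Int → List Int
  | [] => []
  | x :: rest => if x = 0 then fStripLead rest else x :: rest

-- A's second while loop inspects and dels the LAST element while it is 0: the same loop body
-- viewed from the end, hence run on the reversed list and reversed back
def fStripTrailAux : List Int → List Int
  | [] => []
  | x :: rest => if x = 0 then fStripTrailAux rest else x :: rest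

def fStripTrail (l : List Int) : List Int := (fStripTrailAux l.reverse).reverse

-- 'c = array[0]; for i in range(1, len(array)): if array[i] != c: return "NO"' over the tail
def fCheck (c : Int) : List Int → String
  | [] => "YES"
  | x :: xs => if x ≠ c then "NO" else fCheck c xs

def f (array : List Int) : String :=
  if array.length = 1 then "NO"
  else
    let a2 := fStripTrail (fStripLead array)
    if a2.length ≤ 1 then "YES"
    else
      match a2 with
      | [] => "YES"
      | c :: rest => fCheck c rest

-- ===== PORT B =====
def f_alt (array : List Int) : String :=
  if array.length = 1 then "NO"
  else
    let nz := ((PySem.List.enumerate array 0).filter (fun p => p.2 != 0)).map Prod.fst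
    if nz = [] then "YES"
    else
      let s := PySem.List.slice array (some (PySem.List.pyGetD nz 0 0))
                                      (some (PySem.List.pyGetD nz (-1) 0 + 1))
      if (PySem.Set.ofList s).length ≤ 1 then "YES" else "NO"

-- ===== PRECONDITION & SPEC =====
def Spec_f (array : List Int) (out : String) : Prop := out = f_alt array
instance (array : List Int) (out : String) : Decidable (Spec_f array out) := by unfold Spec_f; infer_instance

-- ===== CLAIM (what is proved, stated in full; the proofs are below) =====
def Claim_equal_f : Prop := ∀ (array : List Int), Dom_f array → Spec_f array (f array)

-- ===== LEMMAS AND PROOFS =====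

-- B's nonzero-index list, named for the proofs (definitionally the expression in f_alt)
def nzf (l : List Int) (s : Int) : List Int :=
  ((PySem.List.enumerate l s).filter (fun p => p.2 != 0)).map Prod.fst

lemma f_alt_eq (array : List Int) :
    f_alt array =
      if array.length = 1 then "NO"
      else
        if nzf array 0 = [] then "YES"
        else
          if (PySem.Set.ofList (PySem.List.slice array
                (some (PySem.List.pyGetD (nzf array 0) 0 0))
                (some (PySem.List.pyGetD (nzf array 0) (-1) 0 + 1)))).length ≤ 1
          then "YES" else "NO" := rfl

lemma nzf_cons (x : Int) (l : List Int) (s : Int) :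
    nzf (x :: l) s = if x = 0 then nzf l (s + 1) else s :: nzf l (s + 1) := by
  by_cases h : x = 0 <;>
    simp [nzf, PySem.List.enumerate_cons, h]

lemma nzf_shift (l : List Int) (s : Int) : nzf l s = (nzf l 0).map (· + s) := by
  induction l generalizing s with
  | nil => simp [nzf]
  | cons x l ih =>
    rw [nzf_cons, nzf_cons, ih (s + 1), ih (0 + 1)]
    by_cases h : x = 0 <;>
      simp [h, List.map_map, Function.comp_def] <;>
      (intro a _; ring)

lemma nzf_cons_zero (x : Int) (l : List Int) :
    nzf (x :: l) 0 = if x = 0 then (nzf l 0).map (· + 1) else 0 :: (nzf l 0).map (· + 1) := by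
  rw [nzf_cons, nzf_shift l (0 + 1)]
  simp only [zero_add]

lemma stripLead_zeros (l : List Int) (h : ∀ y ∈ l, y = 0) : fStripLead l = [] := by
  induction l with
  | nil => rfl
  | cons x l ih =>
    have hx : x = 0 := h x (by simp)
    simpa [fStripLead, hx] using ih (fun y hy => h y (by simp [hy]))

lemma stripTrailAux_zeros (l t : List Int) (h : ∀ y ∈ l, y = 0) :
    fStripTrailAux (l ++ t) = fStripTrailAux t := by
  induction l with
  | nil => rfl
  | cons x l ih =>
    have hx : x = 0 := h x (by simp)
    simpa [fStripTrailAux, hx] using ih (fun y hy => h y (by simp [hy]))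

lemma stripTrailAux_append (l t : List Int) (h : ∃ y ∈ l, y ≠ 0) :
    fStripTrailAux (l ++ t) = fStripTrailAux l ++ t := by
  induction l with
  | nil => simp at h
  | cons x l ih =>
    by_cases hx : x = 0
    · have h' : ∃ y ∈ l, y ≠ 0 := by
        obtain ⟨y, hy, hy0⟩ := h
        simp at hy
        rcases hy with h0 | hmem
        · exact absurd (h0 ▸ hx) hy0
        · exact ⟨y, hmem, hy0⟩
      simp [fStripTrailAux, hx, ih h']
    · simp [fStripTrailAux, hx]

lemma stripTrail_cons_of_ex (x : Int) (l : List Int) (h : ∃ y ∈ l, y ≠ 0) :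
    fStripTrail (x :: l) = x :: fStripTrail l := by
  have h' : ∃ y ∈ l.reverse, y ≠ 0 := by
    obtain ⟨y, hy, hy0⟩ := h; exact ⟨y, by simp [hy], hy0⟩
  simp [fStripTrail, stripTrailAux_append l.reverse [x] h']

lemma stripTrail_cons_of_zeros (x : Int) (l : List Int) (hx : x ≠ 0)
    (h : ∀ y ∈ l, y = 0) : fStripTrail (x :: l) = [x] := by
  have h' : ∀ y ∈ l.reverse, y = 0 := fun y hy => h y (by simpa using hy)
  simp [fStripTrail, stripTrailAux_zeros l.reverse [x] h', fStripTrailAux, hx]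

-- the main invariant: B's nonzero-index list determines A's stripped list as a drop/take slice
lemma main_inv (l : List Int) :
    (nzf l 0 = [] → ∀ y ∈ l, y = 0) ∧
    (∀ i0 r, nzf l 0 = i0 :: r →
      ∃ u J, i0 :: r = u ++ [J] ∧ 0 ≤ i0 ∧ i0 ≤ J ∧ J < (l.length : Int) ∧
        (∃ y ∈ l, y ≠ 0) ∧ fStripTrail l = l.take (J.toNat + 1) ∧
        fStripTrail (fStripLead l) = (l.drop i0.toNat).take (J.toNat + 1 - i0.toNat)) := by
  induction l with
  | nil =>
    refine ⟨fun _ y hy => absurd hy (by simp), fun i0 r h => ?_⟩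
    simp [nzf, PySem.List.enumerate_nil] at h
  | cons x l ih =>
    obtain ⟨ih0, ih1⟩ := ih
    by_cases hx : x = 0
    · rw [nzf_cons_zero, if_pos hx]
      constructor
      · intro hmap y hy
        have hnz : nzf l 0 = [] := by simpa using hmap
        simp at hy
        rcases hy with rfl | hmem
        · exact hx
        · exact ih0 hnz y hmem
      · intro i0 r hmap
        cases hnz : nzf l 0 with
        | nil => rw [hnz] at hmap; simp at hmap
        | cons j0 r' =>
          rw [hnz, List.map_cons] at hmap
          obtain ⟨hi0, hr⟩ := List.cons.inj hmap
          obtain ⟨u, J, hu, hj0, hle, hlt, hex, htrail, hstrip⟩ := ih1 j0 r' hnz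
          have hexx : ∃ y ∈ x :: l, y ≠ 0 := by
            obtain ⟨y, hy, hy0⟩ := hex; exact ⟨y, by simp [hy], hy0⟩
          refine ⟨u.map (· + 1), J + 1, ?_, by omega, by omega, ?_, hexx, ?_, ?_⟩
          · rw [← hi0, ← hr]
            simpa using congrArg (List.map (· + 1)) hu
          · simp only [List.length_cons]; push_cast; omega
          · have h1 : (J + 1).toNat + 1 = (J.toNat + 1) + 1 := by omega
            rw [hx, stripTrail_cons_of_ex 0 l hex, htrail, h1, List.take_succ_cons]
          · have h2 : (i0).toNat = j0.toNat + 1 := by omega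
            rw [hx, show fStripLead (0 :: l) = fStripLead l from by simp [fStripLead],
              hstrip, h2, List.drop_succ_cons,
              show (J + 1).toNat + 1 - (j0.toNat + 1) = J.toNat + 1 - j0.toNat from by omega]
    · rw [nzf_cons_zero, if_neg hx]
      constructor
      · intro hmap; simp at hmap
      · intro i0 r hmap
        have hi0 : i0 = 0 := ((List.cons.inj hmap).1).symm
        have hr : r = (nzf l 0).map (· + 1) := ((List.cons.inj hmap).2).symm
        cases hnz : nzf l 0 with
        | nil =>
          have hz : ∀ y ∈ l, y = 0 := ih0 hnz
          refine ⟨[], 0, by simp [hi0, hr, hnz], by omega, by omega, ?_, ⟨x, by simp, hx⟩, ?_, ?_⟩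
          · simp only [List.length_cons]; push_cast; omega
          · rw [stripTrail_cons_of_zeros x l hx hz]; rfl
          · rw [show fStripLead (x :: l) = x :: l from by simp [fStripLead, hx],
              stripTrail_cons_of_zeros x l hx hz, hi0]; rfl
        | cons j0 r' =>
          obtain ⟨u, J, hu, hj0, hle, hlt, hex, htrail, hstrip⟩ := ih1 j0 r' hnz
          refine ⟨0 :: u.map (· + 1), J + 1, ?_, by omega, by omega, ?_, ⟨x, by simp, hx⟩, ?_, ?_⟩
          · rw [hi0, hr, hnz, hu]; simp
          · simp only [List.length_cons]; push_cast; omega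
          · have h1 : (J + 1).toNat + 1 = (J.toNat + 1) + 1 := by omega
            rw [stripTrail_cons_of_ex x l hex, htrail, h1, List.take_succ_cons]
          · have h1 : (J + 1).toNat + 1 = (J.toNat + 1) + 1 := by omega
            rw [show fStripLead (x :: l) = x :: l from by simp [fStripLead, hx], hi0,
              stripTrail_cons_of_ex x l hex, htrail]
            simp only [Int.toNat_zero, List.drop_zero, Nat.sub_zero, h1, List.take_succ_cons]

lemma fCheck_of_all (c : Int) (rest : List Int) (h : ∀ y ∈ rest, y = c) :
    fCheck c rest = "YES" := by
  induction rest with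
  | nil => rfl
  | cons y t ih =>
    have hy : y = c := h y (by simp)
    simpa [fCheck, hy] using ih (fun z hz => h z (by simp [hz]))

lemma fCheck_of_not_all (c : Int) (rest : List Int) (h : ¬ ∀ y ∈ rest, y = c) :
    fCheck c rest = "NO" := by
  induction rest with
  | nil => exact absurd (by simp) h
  | cons y t ih =>
    by_cases hy : y = c
    · have h' : ¬ ∀ z ∈ t, z = c := fun hall => h (by
        intro z hz; simp at hz
        rcases hz with rfl | hm
        · exact hy
        · exact hall z hm)
      simpa [fCheck, hy] using ih h'
    · simp [fCheck, hy]

lemma set_of_all (c : Int) (rest : List Int) (h : ∀ y ∈ rest, y = c) :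
    PySem.Set.ofList (c :: rest) = [c] := by
  rw [PySem.Set.ofList_eq_foldl]
  have hstep : List.foldl PySem.Set.add [] (c :: rest) = List.foldl PySem.Set.add [c] rest := rfl
  rw [hstep]
  induction rest with
  | nil => rfl
  | cons y t ih =>
    have hy : y = c := h y (by simp)
    have hadd : PySem.Set.add [c] y = [c] := by
      simp [PySem.Set.add, hy, PySem.Set.contains]
    simpa [List.foldl_cons, hadd] using ih (fun z hz => h z (by simp [hz]))

lemma two_mem_length (S : List Int) (c y : Int) (hc : c ∈ S) (hy : y ∈ S) (hne : y ≠ c) :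
    1 < S.length := by
  match S with
  | [] => simp at hc
  | [a] =>
    simp at hc hy
    exact absurd (hy.trans hc.symm) hne
  | a :: b :: t => simp only [List.length_cons]; omega

lemma set_of_not_all (c : Int) (rest : List Int) (h : ¬ ∀ y ∈ rest, y = c) :
    1 < (PySem.Set.ofList (c :: rest)).length := by
  simp only [not_forall] at h
  obtain ⟨y, hy, hne⟩ := h
  exact two_mem_length _ c y
    ((PySem.Set.mem_ofList _ c).mpr (by simp))
    ((PySem.Set.mem_ofList _ y).mpr (by simp [hy])) hne

-- ===== VERDICT (by name: the statement is the Claim_ definition above) =====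
theorem f_spec : Claim_equal_f := by
  intro array _
  unfold Spec_f
  by_cases hlen : array.length = 1
  · simp [f, f_alt, hlen]
  · cases h : nzf array 0 with
    | nil =>
      have hz := (main_inv array).1 h
      have hlead : fStripLead array = [] := stripLead_zeros array hz
      rw [f_alt_eq, if_neg hlen, if_pos h]
      simp [f, hlen, hlead, fStripTrail, fStripTrailAux]
    | cons i0 r =>
      obtain ⟨u, J, hu, h0, hij, hJlt, _, _, hstrip⟩ := (main_inv array).2 i0 r h
      have hget0 : PySem.List.pyGetD (i0 :: r) 0 0 = i0 := PySem.List.pyGetD_zero_cons ..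
      have hgetl : PySem.List.pyGetD (i0 :: r) (-1) 0 = J := by
        rw [hu]; exact PySem.List.pyGetD_neg_one_append_singleton ..
      have hslice : PySem.List.slice array (some i0) (some (J + 1)) =
          (array.drop i0.toNat).take (J.toNat + 1 - i0.toNat) := by
        rw [PySem.List.slice_toNat array h0 (by omega)]
        congr 1; omega
      have hslen : ((array.drop i0.toNat).take (J.toNat + 1 - i0.toNat)).length
          = J.toNat + 1 - i0.toNat := by
        simp only [List.length_take, List.length_drop]; omega
      have hsne : (array.drop i0.toNat).take (J.toNat + 1 - i0.toNat) ≠ [] := by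
        intro hnil
        rw [hnil] at hslen
        simp at hslen
        omega
      obtain ⟨c, rest, hcr⟩ := List.exists_cons_of_ne_nil hsne
      have hA : f array = fCheck c rest := by
        simp only [f, if_neg hlen, hstrip, hcr]
        by_cases h1 : (c :: rest).length ≤ 1
        · have hr0 : rest = [] := by
            simp only [List.length_cons] at h1
            exact List.eq_nil_of_length_eq_zero (by omega)
          subst hr0
          simp [fCheck]
        · rw [if_neg h1]
      have hB : f_alt array =
          if (PySem.Set.ofList (c :: rest)).length ≤ 1 then "YES" else "NO" := by
        rw [f_alt_eq, if_neg hlen, h, if_neg (by simp), hget0, hgetl, hslice, hcr]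
      rw [hA, hB]
      by_cases hall : ∀ y ∈ rest, y = c
      · rw [fCheck_of_all c rest hall, set_of_all c rest hall, if_pos (by simp)]
      · have hgt := set_of_not_all c rest hall
        rw [fCheck_of_not_all c rest hall, if_neg (by omega)]
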